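-- pv_equiv track=rewrite | github.com/Arne919/BaejoonAlgorithm | 백준/Silver/34725. 직사각형 채우기/직사각형 채우기.py | build_max_layout
-- ===== SOURCE A (Python) =====
-- def build_max_layout(N, M):
--     K = N * M // 4
--     # 행 쌍: (0, N-1), (1, N-2), ...
--     row_pairs = [(i, N-1-i) for i in range(N//2)]
--     # 열 쌍: (0, M-1), (1, M-2), ...
--     col_pairs = [(j, M-1-j) for j in range(M//2)]
--
--     # 초기화
--     a = [[0]*M for _ in range(N)]
--     id = 1
--     for i, (r1, r2) in enumerate(row_pairs):
--         for j, (c1, c2) in enumerate(col_pairs):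
--             # 현재 id를 네 꼭짓점에 배치
--             a[r1][c1] = id
--             a[r1][c2] = id
--             a[r2][c1] = id
--             a[r2][c2] = id
--             id += 1
--
--     return a
-- ===== SOURCE B (Python) =====
-- def build_max_layout(N, M):
--     # Closed-form mirror construction: build the increasing first half of each
--     # quadrant row once and mirror it, instead of placing four corners per pair.
--     n2, m2 = N // 2, M // 2
--     out = []
--     for r in range(N):
--         i = min(r, N - 1 - r)
--         if i < n2 and m2 > 0:
--             half = list(range(i * m2 + 1, i * m2 + m2 + 1))
--             out.append(half + [0] * (M - 2 * m2) + half[::-1])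
--         else:
--             out.append([0] * M)
--     return out
-- ===== Notes on version B (the rewrite author's own statement) =====
-- stated objective: alternative
-- what changed: Replaces A's four-corner placement loop (mutable grid, running id counter over row/column pairs) by a closed-form row construction: each row is determined by its quadrant index i = min(r, N-1-r); its first half is the consecutive ids range(i*(M//2)+1, i*(M//2)+M//2+1), mirrored for the second half, with zeros for the middle column/row of odd dimensions.
import Mathlib
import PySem

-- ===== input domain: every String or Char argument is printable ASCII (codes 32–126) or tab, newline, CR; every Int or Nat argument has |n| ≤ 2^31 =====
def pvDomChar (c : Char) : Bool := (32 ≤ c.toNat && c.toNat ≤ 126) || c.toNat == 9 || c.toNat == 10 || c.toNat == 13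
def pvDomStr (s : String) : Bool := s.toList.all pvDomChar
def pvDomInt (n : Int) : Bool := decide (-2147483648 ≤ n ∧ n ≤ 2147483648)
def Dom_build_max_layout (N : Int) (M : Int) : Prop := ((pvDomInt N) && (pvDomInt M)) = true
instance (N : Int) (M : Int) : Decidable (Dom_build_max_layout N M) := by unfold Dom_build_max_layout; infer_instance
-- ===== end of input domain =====

-- B replaces A's four-corner placement loop (mutable grid + running id) by a closed-form mirrored-row construction; objective: alternative.


-- ===== PORT A =====
-- helper: `a[r][c] = v` — read row r (always a non-negative in-range index when A executes it;
-- rows are distinct lists in the Python, so writing the updated row back is exact), set column c, write back.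
def pvSetCell (a : List (List Int)) (r : Int) (c : Int) (v : Int) : List (List Int) :=
  PySem.List.pySetD a r (PySem.List.pySetD (PySem.List.pyGetD a r []) c v)

-- helper: the body of A's inner loop for the row pair (r1, r2) and column pair q = (c1, c2)
def pvInnerStep (r1 : Int) (r2 : Int) (st : List (List Int) × Int) (q : Int × Int) :
    List (List Int) × Int :=
  let a := pvSetCell st.1 r1 q.1 st.2
  let a := pvSetCell a r1 q.2 st.2
  let a := pvSetCell a r2 q.1 st.2
  let a := pvSetCell a r2 q.2 st.2
  (a, st.2 + 1)

def build_max_layout (N : Int) (M : Int) : List (List Int) :=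
  let _K := PySem.Int.floordiv (N * M) 4
  let row_pairs := (PySem.List.pyRange 0 (PySem.Int.floordiv N 2) 1).map (fun i => (i, N - 1 - i))
  let col_pairs := (PySem.List.pyRange 0 (PySem.Int.floordiv M 2) 1).map (fun j => (j, M - 1 - j))
  let a0 := (PySem.List.pyRange 0 N 1).map (fun _ => PySem.List.pyRepeat [(0 : Int)] M)
  let res :=
    (PySem.List.enumerate row_pairs 0).foldl
      (fun st p =>
        (PySem.List.enumerate col_pairs 0).foldl
          (fun st2 q => pvInnerStep p.2.1 p.2.2 st2 q.2) st)
      (a0, 1)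
  res.1

-- ===== PORT B =====
-- `for r in range(N): ... out.append(row)` is the map below; `half[::-1]` is List.reverse (exact);
-- `[0] * k` is PySem.List.pyRepeat [0] k
def build_max_layout_alt (N : Int) (M : Int) : List (List Int) :=
  let n2 := PySem.Int.floordiv N 2
  let m2 := PySem.Int.floordiv M 2
  (PySem.List.pyRange 0 N 1).map (fun r =>
    let i := min r (N - 1 - r)
    if i < n2 ∧ 0 < m2 then
      let half := PySem.List.pyRange (i * m2 + 1) (i * m2 + m2 + 1) 1
      half ++ PySem.List.pyRepeat [(0 : Int)] (M - 2 * m2) ++ half.reverse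
    else
      PySem.List.pyRepeat [(0 : Int)] M)

-- ===== PRECONDITION & SPEC =====
def Spec_build_max_layout (N : Int) (M : Int) (out : List (List Int)) : Prop := out = build_max_layout_alt N M
instance (N : Int) (M : Int) (out : List (List Int)) : Decidable (Spec_build_max_layout N M out) := by unfold Spec_build_max_layout; infer_instance

-- ===== CLAIM (what is proved, stated in full; the proofs are below) =====
def Claim_equal_build_max_layout : Prop := ∀ (N : Int) (M : Int), Dom_build_max_layout N M → Spec_build_max_layout N M (build_max_layout N M)

-- ===== LEMMAS AND PROOFS =====

-- the all-zero row
def pvZrow (M : Int) : List Int := PySem.List.pyRepeat [(0 : Int)] M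

-- the row of a quadrant-row whose pairs (j, M-1-j) for j < k have been placed with ids id0 + j
def pvFrow (M : Int) (id0 : Int) (k : Int) : List Int :=
  (PySem.List.pyRange 0 M 1).map
    (fun c => if min c (M - 1 - c) < k then id0 + min c (M - 1 - c) else 0)

-- one column-pair update on a row
def pvRowUpd (M : Int) (id : Int) (j : Int) (row : List Int) : List Int :=
  PySem.List.pySetD (PySem.List.pySetD row j id) (M - 1 - j) id

-- the inner loop's effect on a single row, column pairs js, threading the id
def pvFillL (M : Int) : List Int → Int → List Int → List Int
  | [], _, row => row
  | j :: t, id, row => pvFillL M t (id + 1) (pvRowUpd M id j row)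

-- grid after the first k row pairs have been processed
def pvGrid (N : Int) (M : Int) (k : Int) : List (List Int) :=
  (PySem.List.pyRange 0 N 1).map
    (fun r => if min r (N - 1 - r) < k
              then pvFrow M (1 + min r (N - 1 - r) * PySem.Int.floordiv M 2) (PySem.Int.floordiv M 2)
              else pvZrow M)

-- folding with a function that ignores the enumerate index
theorem pv_foldl_enumerate {α β : Type} (f : β → α → β) :
    ∀ (l : List α) (s : Int) (init : β),
      (PySem.List.enumerate l s).foldl (fun st q => f st q.2) init = l.foldl f init := by
  intro l
  induction l with
  | nil => intro s init; simp [PySem.List.enumerate_nil]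
  | cons x t ih => intro s init; simp [PySem.List.enumerate_cons, ih]

theorem pv_getD_set_self {α : Type} (l : List α) (i : Nat) (v d : α) (h : i < l.length) :
    (l.set i v).getD i d = v := by
  simp [List.getD_eq_getElem?_getD, h]
theorem pv_getD_set_ne {α : Type} (l : List α) (i k : Nat) (v d : α) (h : i ≠ k) :
    (l.set i v).getD k d = l.getD k d := by
  simp [List.getD_eq_getElem?_getD, h]
theorem pv_innerStep_eq (M : Int) (a : List (List Int)) (id r1 r2 j : Int)
    (h0 : 0 ≤ r1) (h12 : r1 < r2) (h2 : r2 < (a.length : Int)) :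
    pvInnerStep r1 r2 (a, id) (j, M - 1 - j)
      = ((a.set r1.toNat (pvRowUpd M id j (a.getD r1.toNat []))).set r2.toNat
           (pvRowUpd M id j (a.getD r2.toNat [])), id + 1) := by
  have h1 : 0 ≤ r2 := by omega
  have hne : r1.toNat ≠ r2.toNat := by omega
  have hlt1 : r1.toNat < a.length := by omega
  have hlt2 : r2.toNat < a.length := by omega
  have es1 : ∀ (xs : List (List Int)) (v : List Int), PySem.List.pySetD xs r1 v = xs.set r1.toNat v :=
    fun xs v => PySem.List.pySetD_of_nonneg xs v h0
  have es2 : ∀ (xs : List (List Int)) (v : List Int), PySem.List.pySetD xs r2 v = xs.set r2.toNat v :=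
    fun xs v => PySem.List.pySetD_of_nonneg xs v h1
  have gs1 : ∀ (xs : List (List Int)), PySem.List.pyGetD xs r1 ([] : List Int) = xs.getD r1.toNat [] :=
    fun xs => PySem.List.pyGetD_of_nonneg xs [] h0
  have gs2 : ∀ (xs : List (List Int)), PySem.List.pyGetD xs r2 ([] : List Int) = xs.getD r2.toNat [] :=
    fun xs => PySem.List.pyGetD_of_nonneg xs [] h1
  unfold pvInnerStep pvSetCell pvRowUpd
  simp only [es1, es2, gs1, gs2]
  rw [pv_getD_set_self _ _ _ _ hlt1, List.set_set,
      pv_getD_set_ne _ _ _ _ _ hne,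
      pv_getD_set_self _ _ _ _ (by simpa using hlt2), List.set_set,
      pv_getD_set_ne _ _ _ _ _ hne]
theorem pv_inner_fold (M : Int) (r1 r2 : Int) :
    ∀ (js : List Int) (a : List (List Int)) (id : Int),
      0 ≤ r1 → r1 < r2 → r2 < (a.length : Int) →
      js.foldl (fun st j => pvInnerStep r1 r2 st (j, M - 1 - j)) (a, id)
        = ((a.set r1.toNat (pvFillL M js id (a.getD r1.toNat []))).set r2.toNat
             (pvFillL M js id (a.getD r2.toNat [])),
           id + js.length) := by
  intro js
  induction js with
  | nil =>
    intro a id h0 h12 h2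
    have hlt1 : r1.toNat < a.length := by omega
    have hlt2 : r2.toNat < a.length := by omega
    simp only [List.foldl_nil, pvFillL, List.length_nil]
    rw [List.getD_eq_getElem?_getD, List.getD_eq_getElem?_getD,
      List.getElem?_eq_getElem hlt1, List.getElem?_eq_getElem hlt2]
    simp [List.set_getElem_self]
  | cons j t ih =>
    intro a id h0 h12 h2
    have h1 : 0 ≤ r2 := by omega
    have hne : r1.toNat ≠ r2.toNat := by omega
    have hlt1 : r1.toNat < a.length := by omega
    have hlt2 : r2.toNat < a.length := by omega
    simp only [List.foldl_cons]
    rw [pv_innerStep_eq M a id r1 r2 j h0 h12 h2]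
    rw [ih _ _ h0 h12 (by simp; omega)]
    simp only [pvFillL]
    rw [pv_getD_set_ne _ _ _ _ _ (Ne.symm hne), pv_getD_set_self _ _ _ _ hlt1,
        List.set_comm _ _ (Ne.symm hne), List.set_set, List.set_set,
        pv_getD_set_self _ _ _ _ (by simpa using hlt2)]
    simp only [Prod.mk.injEq, List.length_cons]
    exact ⟨trivial, by push_cast; ring⟩

theorem pv_frow_nonpos (M : Int) (id0 k : Int) (hk : k ≤ 0) : pvFrow M id0 k = pvZrow M := by
  unfold pvFrow pvZrow
  rw [PySem.List.pyRepeat_singleton]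
  apply List.ext_getElem
  · simp [PySem.List.length_pyRange_one]
  · intro i h1 h2
    simp only [List.getElem_map, PySem.List.getElem_pyRange_one, List.getElem_replicate]
    have hi : (i : Int) < M := by
      simp [PySem.List.length_pyRange_one] at h1; omega
    split
    · omega
    · rfl

theorem pv_frow_upd (M : Int) (id0 k : Int) (h0 : 0 ≤ k) (hk : k < PySem.Int.floordiv M 2) :
    pvRowUpd M (id0 + k) k (pvFrow M id0 k) = pvFrow M id0 (k + 1) := by
  have hM2 : PySem.Int.floordiv M 2 = M / 2 := PySem.Int.floordiv_eq_ediv_of_pos (by omega)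
  rw [hM2] at hk
  have hc2 : (0 : Int) ≤ M - 1 - k := by omega
  unfold pvRowUpd pvFrow
  rw [PySem.List.pySetD_of_nonneg _ _ h0, PySem.List.pySetD_of_nonneg _ _ hc2]
  apply List.ext_getElem
  · simp
  · intro i h1 h2
    simp only [List.length_set, List.length_map, PySem.List.length_pyRange_one] at h1
    have hiM : (i : Int) < M := by omega
    simp only [List.getElem_set, List.getElem_map, PySem.List.getElem_pyRange_one]
    split_ifs <;> omega

theorem pv_fill_full (M : Int) (id0 : Int) :
    ∀ (d : Nat) (k : Int), 0 ≤ k → PySem.Int.floordiv M 2 - k = (d : Int) →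
      pvFillL M (PySem.List.pyRange k (PySem.Int.floordiv M 2) 1) (id0 + k) (pvFrow M id0 k)
        = pvFrow M id0 (PySem.Int.floordiv M 2) := by
  intro d
  induction d with
  | zero =>
    intro k h0 hd
    have hk : PySem.Int.floordiv M 2 = k := by omega
    rw [hk, PySem.List.pyRange_one_eq_nil (le_refl k)]
    rfl
  | succ d ih =>
    intro k h0 hd
    have hk : k < PySem.Int.floordiv M 2 := by omega
    rw [PySem.List.pyRange_one_cons hk]
    show pvFillL M _ _ _ = _
    simp only [pvFillL]
    rw [pv_frow_upd M id0 k h0 hk]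
    have := ih (k + 1) (by omega) (by omega)
    rw [show id0 + k + 1 = id0 + (k + 1) by ring]
    exact this

theorem pv_grid_set (N M : Int) (k : Int) (h0 : 0 ≤ k) (hk : k < PySem.Int.floordiv N 2) :
    ((pvGrid N M k).set k.toNat (pvFrow M (1 + k * PySem.Int.floordiv M 2) (PySem.Int.floordiv M 2))).set
        (N - 1 - k).toNat (pvFrow M (1 + k * PySem.Int.floordiv M 2) (PySem.Int.floordiv M 2))
      = pvGrid N M (k + 1) := by
  have hN2 : PySem.Int.floordiv N 2 = N / 2 := PySem.Int.floordiv_eq_ediv_of_pos (by omega)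
  rw [hN2] at hk
  have hkN : k < N - 1 - k := by omega
  unfold pvGrid
  apply List.ext_getElem
  · simp
  · intro i h1 h2
    simp only [List.length_set, List.length_map, PySem.List.length_pyRange_one] at h1
    have hiN : (i : Int) < N := by omega
    simp only [List.getElem_set, List.getElem_map, PySem.List.getElem_pyRange_one, zero_add]
    by_cases hA : (N - 1 - k).toNat = i
    · have hmin : min (i : Int) (N - 1 - (i : Int)) = k := by omega
      rw [if_pos hA, hmin, if_pos (by omega : k < k + 1)]
    · by_cases hB : k.toNat = i
      · have hmin : min (i : Int) (N - 1 - (i : Int)) = k := by omega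
        rw [if_neg hA, if_pos hB, hmin, if_pos (by omega : k < k + 1)]
      · rw [if_neg hA, if_neg hB]
        have hne : min (i : Int) (N - 1 - (i : Int)) ≠ k := by omega
        by_cases hm : min (i : Int) (N - 1 - (i : Int)) < k
        · rw [if_pos hm, if_pos (by omega)]
        · rw [if_neg hm, if_neg (by omega)]

theorem pv_fill_from_zero (M : Int) (id0 : Int) :
    pvFillL M (PySem.List.pyRange 0 (PySem.Int.floordiv M 2) 1) id0 (pvZrow M)
      = pvFrow M id0 (PySem.Int.floordiv M 2) := by
  by_cases h : 0 < PySem.Int.floordiv M 2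
  · rw [← pv_frow_nonpos M id0 0 le_rfl]
    have := pv_fill_full M id0 (PySem.Int.floordiv M 2).toNat 0 le_rfl (by omega)
    simpa using this
  · rw [PySem.List.pyRange_one_eq_nil (by omega)]
    exact (pv_frow_nonpos M id0 _ (by omega)).symm

theorem pv_foldl_const {α β : Type} (l : List α) (init : β) :
    l.foldl (fun st _ => st) init = init := by
  induction l generalizing init with
  | nil => rfl
  | cons x t ih => exact ih init

theorem pv_grid_all_zero (N M : Int) (k : Int) (hm : PySem.Int.floordiv M 2 ≤ 0) :
    pvGrid N M k = (PySem.List.pyRange 0 N 1).map (fun _ => pvZrow M) := by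
  unfold pvGrid
  apply List.ext_getElem
  · simp
  · intro i h1 h2
    simp only [List.getElem_map]
    split
    · exact pv_frow_nonpos M _ _ hm
    · rfl

theorem pv_outer_fold (N M : Int) (hm : 0 ≤ PySem.Int.floordiv M 2) :
    ∀ (d : Nat) (k : Int), 0 ≤ k → PySem.Int.floordiv N 2 - k = (d : Int) →
      (PySem.List.pyRange k (PySem.Int.floordiv N 2) 1).foldl
          (fun st i =>
            (PySem.List.pyRange 0 (PySem.Int.floordiv M 2) 1).foldl
              (fun st2 j => pvInnerStep i (N - 1 - i) st2 (j, M - 1 - j)) st)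
          (pvGrid N M k, 1 + k * PySem.Int.floordiv M 2)
        = (pvGrid N M (PySem.Int.floordiv N 2),
           1 + PySem.Int.floordiv N 2 * PySem.Int.floordiv M 2) := by
  intro d
  induction d with
  | zero =>
    intro k h0 hd
    have hk : PySem.Int.floordiv N 2 = k := by omega
    rw [hk, PySem.List.pyRange_one_eq_nil (le_refl k)]
    rfl
  | succ d ih =>
    intro k h0 hd
    have hk : k < PySem.Int.floordiv N 2 := by omega
    have hN2 : PySem.Int.floordiv N 2 = N / 2 := PySem.Int.floordiv_eq_ediv_of_pos (by omega)
    have hkN : k < N - 1 - k := by rw [hN2] at hk; omega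
    have hlen : (N - 1 - k) < ((pvGrid N M k).length : Int) := by
      unfold pvGrid
      simp only [List.length_map, PySem.List.length_pyRange_one]
      rw [hN2] at hk; omega
    rw [PySem.List.pyRange_one_cons hk, List.foldl_cons]
    rw [pv_inner_fold M k (N - 1 - k) _ _ _ h0 hkN hlen]
    have hg1 : (pvGrid N M k).getD k.toNat [] = pvZrow M := by
      have hkn : k.toNat < ((PySem.List.pyRange 0 N 1).map (fun _ => (0:Int))).length := by
        simp [PySem.List.length_pyRange_one]; rw [hN2] at hk; omega
      unfold pvGrid
      rw [List.getD_eq_getElem?_getD, List.getElem?_eq_getElem (by simpa using hkn)]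
      simp only [List.getElem_map, PySem.List.getElem_pyRange_one, zero_add]
      rw [if_neg (by rw [hN2] at hk; omega)]
      rfl
    have hg2 : (pvGrid N M k).getD (N - 1 - k).toNat [] = pvZrow M := by
      have hkn : (N - 1 - k).toNat < ((PySem.List.pyRange 0 N 1).map (fun _ => (0:Int))).length := by
        simp [PySem.List.length_pyRange_one]; rw [hN2] at hk; omega
      unfold pvGrid
      rw [List.getD_eq_getElem?_getD, List.getElem?_eq_getElem (by simpa using hkn)]
      simp only [List.getElem_map, PySem.List.getElem_pyRange_one, zero_add]
      rw [if_neg (by rw [hN2] at hk; omega)]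
      rfl
    rw [hg1, hg2, pv_fill_from_zero]
    rw [pv_grid_set N M k h0 hk]
    have hlen2 : ((PySem.List.pyRange 0 (PySem.Int.floordiv M 2) 1).length : Int)
        = PySem.Int.floordiv M 2 := by
      rw [PySem.List.length_pyRange_one]; omega
    have hid : 1 + k * PySem.Int.floordiv M 2 + ((PySem.List.pyRange 0 (PySem.Int.floordiv M 2) 1).length : Int)
        = 1 + (k + 1) * PySem.Int.floordiv M 2 := by rw [hlen2]; ring
    rw [hid]
    exact ih (k + 1) (by omega) (by omega)

theorem pv_grid_nonpos (N M : Int) (k : Int) (hk : k ≤ 0) :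
    pvGrid N M k = (PySem.List.pyRange 0 N 1).map (fun _ => pvZrow M) := by
  unfold pvGrid
  apply List.ext_getElem
  · simp
  · intro i h1 h2
    simp only [List.getElem_map, PySem.List.getElem_pyRange_one]
    have hi : (i : Int) < N := by
      simp [PySem.List.length_pyRange_one] at h1; omega
    split
    · omega
    · rfl

theorem pv_outer_fold0 (N M : Int) (hm : 0 ≤ PySem.Int.floordiv M 2)
    (hn : 0 < PySem.Int.floordiv N 2) :
    (PySem.List.pyRange 0 (PySem.Int.floordiv N 2) 1).foldl
        (fun st i =>
          (PySem.List.pyRange 0 (PySem.Int.floordiv M 2) 1).foldl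
            (fun st2 j => pvInnerStep i (N - 1 - i) st2 (j, M - 1 - j)) st)
        ((PySem.List.pyRange 0 N 1).map (fun _ => PySem.List.pyRepeat [(0 : Int)] M), 1)
      = (pvGrid N M (PySem.Int.floordiv N 2),
         1 + PySem.Int.floordiv N 2 * PySem.Int.floordiv M 2) := by
  have h := pv_outer_fold N M hm (PySem.Int.floordiv N 2).toNat 0 le_rfl (by omega)
  rw [pv_grid_nonpos N M 0 le_rfl] at h
  simp only [pvZrow] at h
  rw [show (1 : Int) + 0 * PySem.Int.floordiv M 2 = 1 by ring] at h
  exact h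

theorem pv_A_eq_grid (N M : Int) : build_max_layout N M = pvGrid N M (PySem.Int.floordiv N 2) := by
  simp only [build_max_layout, pv_foldl_enumerate, List.foldl_map]
  rw [pv_foldl_enumerate (fun (st : List (List Int) × Int) (pq : Int × Int) => List.foldl
      (fun x y => pvInnerStep pq.1 pq.2 x (y, M - 1 - y)) st
      (PySem.List.pyRange 0 (PySem.Int.floordiv M 2) 1))]
  simp only [List.foldl_map]
  by_cases hn : 0 < PySem.Int.floordiv N 2
  · by_cases hm : 0 ≤ PySem.Int.floordiv M 2
    · rw [pv_outer_fold0 N M hm hn]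
    · rw [PySem.List.pyRange_one_eq_nil (by omega : PySem.Int.floordiv M 2 ≤ (0:Int))]
      simp only [List.foldl_nil]
      rw [pv_foldl_const]
      rw [pv_grid_all_zero N M _ (by omega)]
      rfl
  · rw [PySem.List.pyRange_one_eq_nil (by omega : PySem.Int.floordiv N 2 ≤ (0:Int)), List.foldl_nil]
    rw [pv_grid_nonpos N M _ (by omega)]
    rfl

theorem pv_half_row (M : Int) (b : Int) (hm : 0 < PySem.Int.floordiv M 2) :
    PySem.List.pyRange (b + 1) (b + PySem.Int.floordiv M 2 + 1) 1
        ++ PySem.List.pyRepeat [(0 : Int)] (M - 2 * PySem.Int.floordiv M 2)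
        ++ (PySem.List.pyRange (b + 1) (b + PySem.Int.floordiv M 2 + 1) 1).reverse
      = pvFrow M (1 + b) (PySem.Int.floordiv M 2) := by
  have hM2 : PySem.Int.floordiv M 2 = M / 2 := PySem.Int.floordiv_eq_ediv_of_pos (by omega)
  rw [hM2] at hm ⊢
  unfold pvFrow
  rw [PySem.List.pyRepeat_singleton]
  have hl : (PySem.List.pyRange (b + 1) (b + M / 2 + 1) 1).length = (M / 2).toNat := by
    rw [PySem.List.length_pyRange_one]; omega
  apply List.ext_getElem
  · simp only [List.length_append, List.length_reverse, List.length_replicate, hl,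
      List.length_map, PySem.List.length_pyRange_one]
    omega
  · intro t h1 h2
    simp only [List.length_map, PySem.List.length_pyRange_one] at h2
    have htM : (t : Int) < M := by omega
    rw [List.getElem_map, PySem.List.getElem_pyRange_one, zero_add]
    by_cases hA : t < (M / 2).toNat
    · rw [List.getElem_append_left (by simp only [List.length_append, hl]; omega),
        List.getElem_append_left (by omega : t < (PySem.List.pyRange (b + 1) (b + M / 2 + 1) 1).length),
        PySem.List.getElem_pyRange_one]
      have hmin : min (t : Int) (M - 1 - (t : Int)) = (t : Int) := by omega
      rw [hmin, if_pos (by omega)]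
      omega
    · by_cases hB : t < (M / 2).toNat + (M - 2 * (M / 2)).toNat
      · rw [List.getElem_append_left (by simp only [List.length_append, List.length_replicate, hl]; omega),
          List.getElem_append_right (by omega : (PySem.List.pyRange (b + 1) (b + M / 2 + 1) 1).length ≤ t),
          List.getElem_replicate]
        have hmin : ¬ min (t : Int) (M - 1 - (t : Int)) < M / 2 := by omega
        rw [if_neg hmin]
      · rw [List.getElem_append_right (by simp only [List.length_append, List.length_replicate, hl]; omega),
          List.getElem_reverse, PySem.List.getElem_pyRange_one]
        have hmin : min (t : Int) (M - 1 - (t : Int)) = M - 1 - (t : Int) := by omega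
        rw [hmin, if_pos (by omega)]
        simp only [List.length_append, List.length_replicate, hl]
        omega

theorem pv_B_eq_grid (N M : Int) : build_max_layout_alt N M = pvGrid N M (PySem.Int.floordiv N 2) := by
  simp only [build_max_layout_alt, pvGrid]
  apply List.ext_getElem
  · simp
  · intro r h1 h2
    simp only [List.getElem_map, PySem.List.getElem_pyRange_one, zero_add]
    by_cases hc : min (r : Int) (N - 1 - (r : Int)) < PySem.Int.floordiv N 2 ∧
        0 < PySem.Int.floordiv M 2
    · rw [if_pos hc, if_pos hc.1]
      generalize min (r : Int) (N - 1 - (r : Int)) * PySem.Int.floordiv M 2 = b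
      exact pv_half_row M b hc.2
    · rw [if_neg hc]
      by_cases hc1 : min (r : Int) (N - 1 - (r : Int)) < PySem.Int.floordiv N 2
      · rw [if_pos hc1, pv_frow_nonpos M _ _ (by omega : PySem.Int.floordiv M 2 ≤ 0)]
        rfl
      · rw [if_neg hc1]
        rfl

-- ===== VERDICT (by name: the statement is the Claim_ definition above) =====
theorem build_max_layout_spec : Claim_equal_build_max_layout := by
  intro N M _
  show build_max_layout N M = build_max_layout_alt N M
  rw [pv_A_eq_grid, pv_B_eq_grid]
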